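-- pv_equiv track=rewrite | github.com/terrencepreilly/rinter | src/rinter/rinter.py | header_contains_necessary_fields
-- ===== SOURCE A (Python) =====
-- REQUIRED_HEADER_SECTIONS = [
--     'Name',
--     'Section',
--     'Assignment',
--     'Due',
--     'Credit',
--     'Problem',
--     'Solution',
--     'Errors handled',
--     'Limitations'
--     ]
--
-- def header_contains_necessary_fields(header):
--     """ Return a list of strings describing the missing headers. """
--     lines = header.split('\n')
--     ret = []
--     for hsec in REQUIRED_HEADER_SECTIONS:
--         f = filter(lambda x : x.lstrip().startswith(hsec), lines)
--         try:
--             next(f)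
--         except:
--             ret.append('header missing {}'.format(hsec))
--     return ret
-- ===== SOURCE B (Python) =====
-- REQUIRED_HEADER_SECTIONS = [
--     'Name',
--     'Section',
--     'Assignment',
--     'Due',
--     'Credit',
--     'Problem',
--     'Solution',
--     'Errors handled',
--     'Limitations'
--     ]
--
-- def header_contains_necessary_fields(header):
--     """ Return a list of strings describing the missing headers. """
--     present = set()
--     for line in header.split('\n'):
--         stripped = line.lstrip()
--         for sec in REQUIRED_HEADER_SECTIONS:
--             if stripped.startswith(sec):
--                 present.add(sec)
--     return ['header missing {}'.format(sec)
--             for sec in REQUIRED_HEADER_SECTIONS if sec not in present]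
-- ===== Notes on version B (the rewrite author's own statement) =====
-- stated objective: alternative
-- what changed: Instead of scanning all lines once per required section (restarting a filter for each section), B makes a single pass over the lines building a presence set of the sections found, then derives the missing list in a second pass over the required-sections list.
import Mathlib
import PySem

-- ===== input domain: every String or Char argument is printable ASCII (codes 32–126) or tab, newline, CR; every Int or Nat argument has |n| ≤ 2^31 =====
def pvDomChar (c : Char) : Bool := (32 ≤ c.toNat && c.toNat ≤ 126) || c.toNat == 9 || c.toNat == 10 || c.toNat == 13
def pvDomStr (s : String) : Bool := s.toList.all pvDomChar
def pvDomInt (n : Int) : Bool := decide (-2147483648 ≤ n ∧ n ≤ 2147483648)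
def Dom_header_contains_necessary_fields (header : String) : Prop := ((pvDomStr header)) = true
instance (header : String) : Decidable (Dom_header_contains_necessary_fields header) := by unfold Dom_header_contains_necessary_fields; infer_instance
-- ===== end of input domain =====

-- B replaces A's per-section rescans of the lines with one presence-set pass over the
-- lines followed by a lookup pass over the required sections (alternative structure).

def REQUIRED_HEADER_SECTIONS : List String :=
  ["Name", "Section", "Assignment", "Due", "Credit", "Problem", "Solution",
   "Errors handled", "Limitations"]

-- ===== PORT A =====
-- header.split('\n') = split? (some: separator non-empty), read off with getD.
-- for each hsec: try next(filter(...)) succeeds iff some line matches (ported as List.any).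
def header_contains_necessary_fields (header : String) : List String :=
  let lines := (PySem.Str.split? header "\n").getD []
  REQUIRED_HEADER_SECTIONS.foldl
    (fun ret hsec =>
      if lines.any (fun x => PySem.Str.startswith (PySem.Str.lstrip x) hsec) then ret
      else ret ++ ["header missing " ++ hsec])
    []

-- ===== PORT B =====
def header_contains_necessary_fields_alt (header : String) : List String :=
  let present : PySem.Set String :=
    ((PySem.Str.split? header "\n").getD []).foldl
      (fun s line =>
        let stripped := PySem.Str.lstrip line
        REQUIRED_HEADER_SECTIONS.foldl
          (fun s sec => if PySem.Str.startswith stripped sec then PySem.Set.add s sec else s)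
          s)
      PySem.Set.empty
  REQUIRED_HEADER_SECTIONS.filterMap
    (fun sec => if PySem.Set.contains present sec then none else some ("header missing " ++ sec))

-- ===== PRECONDITION & SPEC =====
def Spec_header_contains_necessary_fields (header : String) (out : List String) : Prop := out = header_contains_necessary_fields_alt header
instance (header : String) (out : List String) : Decidable (Spec_header_contains_necessary_fields header out) := by unfold Spec_header_contains_necessary_fields; infer_instance

-- ===== CLAIM (what is proved, stated in full; the proofs are below) =====
def Claim_equal_header_contains_necessary_fields : Prop := ∀ (header : String), Dom_header_contains_necessary_fields header → Spec_header_contains_necessary_fields header (header_contains_necessary_fields header)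

-- ===== LEMMAS AND PROOFS =====

-- membership in B's inner fold over the required sections, for one line
lemma mem_inner_fold (stripped : String) (l : List String) (s : PySem.Set String) (sec : String) :
    sec ∈ l.foldl
        (fun s sc => if PySem.Str.startswith stripped sc then PySem.Set.add s sc else s) s ↔
      sec ∈ s ∨ (sec ∈ l ∧ PySem.Str.startswith stripped sec = true) := by
  induction l generalizing s with
  | nil => simp
  | cons hd tl ih =>
    simp only [List.foldl_cons, ih, List.mem_cons]
    split_ifs with h
    · simp only [PySem.Set.mem_add]
      constructor
      · rintro (⟨hs | rfl⟩ | ⟨htl, hsw⟩)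
        · exact Or.inl hs
        · exact Or.inr ⟨Or.inl rfl, h⟩
        · exact Or.inr ⟨Or.inr htl, hsw⟩
      · rintro (hs | ⟨rfl | htl, hsw⟩)
        · exact Or.inl (Or.inl hs)
        · exact Or.inl (Or.inr rfl)
        · exact Or.inr ⟨htl, hsw⟩
    · constructor
      · rintro (hs | ⟨htl, hsw⟩)
        · exact Or.inl hs
        · exact Or.inr ⟨Or.inr htl, hsw⟩
      · rintro (hs | ⟨rfl | htl, hsw⟩)
        · exact Or.inl hs
        · exact absurd hsw h
        · exact Or.inr ⟨htl, hsw⟩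

-- membership in B's outer fold over the lines
lemma mem_outer_fold (lines : List String) (s : PySem.Set String) (sec : String) :
    sec ∈ lines.foldl
        (fun s line =>
          let stripped := PySem.Str.lstrip line
          REQUIRED_HEADER_SECTIONS.foldl
            (fun s sc => if PySem.Str.startswith stripped sc then PySem.Set.add s sc else s) s)
        s ↔
      sec ∈ s ∨ (sec ∈ REQUIRED_HEADER_SECTIONS ∧
        ∃ line ∈ lines, PySem.Str.startswith (PySem.Str.lstrip line) sec = true) := by
  induction lines generalizing s with
  | nil => simp
  | cons hd tl ih =>
    simp only [List.foldl_cons, ih, mem_inner_fold, List.mem_cons]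
    constructor
    · rintro ((hs | ⟨hr, hsw⟩) | ⟨hr, line, hl, hsw⟩)
      · exact Or.inl hs
      · exact Or.inr ⟨hr, hd, Or.inl rfl, hsw⟩
      · exact Or.inr ⟨hr, line, Or.inr hl, hsw⟩
    · rintro (hs | ⟨hr, line, (rfl | hl), hsw⟩)
      · exact Or.inl (Or.inl hs)
      · exact Or.inl (Or.inr ⟨hr, hsw⟩)
      · exact Or.inr ⟨hr, line, hl, hsw⟩

-- A's accumulator fold equals an accumulator-free filterMap, given the conditions agree
lemma foldl_eq_filterMap (c1 c2 : String → Bool) (l acc : List String)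
    (h : ∀ sec ∈ l, c1 sec = c2 sec) :
    l.foldl (fun ret hsec => if c1 hsec then ret else ret ++ ["header missing " ++ hsec]) acc =
      acc ++ l.filterMap (fun sec => if c2 sec then none else some ("header missing " ++ sec)) := by
  induction l generalizing acc with
  | nil => simp
  | cons hd tl ih =>
    have hhd : c1 hd = c2 hd := h hd (List.mem_cons_self ..)
    simp only [List.foldl_cons, List.filterMap_cons, hhd]
    cases hc : c2 hd with
    | true => simp [ih _ (fun sec hs => h sec (List.mem_cons_of_mem _ hs))]
    | false => simp [ih _ (fun sec hs => h sec (List.mem_cons_of_mem _ hs))]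

-- ===== VERDICT (by name: the statement is the Claim_ definition above) =====
theorem header_contains_necessary_fields_spec : Claim_equal_header_contains_necessary_fields := by
  intro header _
  unfold Spec_header_contains_necessary_fields
  unfold header_contains_necessary_fields header_contains_necessary_fields_alt
  dsimp only
  apply foldl_eq_filterMap
  intro sec hsec
  rw [Bool.eq_iff_iff, List.any_eq_true, PySem.Set.contains_iff, mem_outer_fold]
  simp [hsec, PySem.Set.empty]
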